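-- pv_equiv track=rewrite | github.com/tsjmaryam/Cyber-security-co-pilot- | src/services/coverage_review_service.py | _aggregate_category_status
-- ===== SOURCE A (Python) =====
-- from typing import Any, Protocol
--
-- def _aggregate_category_status(relevant_checks: list[dict[str, Any]], relevant_sources: list[str]) -> str:
--     if any(check.get("status") == "checked_signal_found" for check in relevant_checks):
--         return "checked_signal_found"
--     if any(check.get("status") == "checked_no_signal" for check in relevant_checks):
--         return "checked_no_signal"
--     if any(check.get("status") == "data_unavailable" for check in relevant_checks) or relevant_sources:
--         return "data_unavailable" if not any(check.get("status") == "not_checked" for check in relevant_checks) else "not_checked"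
--     if any(check.get("status") == "not_checked" for check in relevant_checks):
--         return "not_checked"
--     return "unknown"
-- ===== SOURCE B (Python) =====
-- def _aggregate_category_status(relevant_checks: list, relevant_sources: list) -> str:
--     statuses = {c.get("status") for c in relevant_checks}
--     if "checked_signal_found" in statuses:
--         return "checked_signal_found"
--     if "checked_no_signal" in statuses:
--         return "checked_no_signal"
--     if "not_checked" in statuses:
--         return "not_checked"
--     if "data_unavailable" in statuses or relevant_sources:
--         return "data_unavailable"
--     return "unknown"
-- ===== Notes on version B (the rewrite author's own statement) =====
-- stated objective: simpler
-- what changed: B builds the set of present statuses in one pass and decides by a flat membership chain (noting that a present 'not_checked' always wins over 'data_unavailable'), replacing A's five repeated scans and nested ternary.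
import Mathlib
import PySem

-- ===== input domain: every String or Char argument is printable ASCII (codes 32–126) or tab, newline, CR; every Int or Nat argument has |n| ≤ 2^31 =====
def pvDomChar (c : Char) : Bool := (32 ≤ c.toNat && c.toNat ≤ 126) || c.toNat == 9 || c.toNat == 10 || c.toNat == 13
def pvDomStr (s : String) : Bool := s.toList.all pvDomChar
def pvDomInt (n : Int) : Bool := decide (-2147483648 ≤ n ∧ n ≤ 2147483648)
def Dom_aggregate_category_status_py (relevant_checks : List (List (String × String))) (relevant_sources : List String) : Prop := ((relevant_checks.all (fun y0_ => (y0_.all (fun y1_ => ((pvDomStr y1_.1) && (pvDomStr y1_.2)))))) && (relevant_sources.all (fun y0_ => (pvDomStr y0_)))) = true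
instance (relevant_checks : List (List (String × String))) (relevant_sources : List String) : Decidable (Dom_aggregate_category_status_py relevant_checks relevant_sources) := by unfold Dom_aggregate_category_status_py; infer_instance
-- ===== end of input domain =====

-- B builds the status set in one pass and decides by a flat membership chain; simpler, same behaviour.

-- ===== PORT A =====
def aggregate_category_status_py (relevant_checks : List (List (String × String))) (relevant_sources : List String) : String :=
  if relevant_checks.any (fun check => PySem.Dict.get? (PySem.Dict.mk check) "status" == some "checked_signal_found") then
    "checked_signal_found"
  else if relevant_checks.any (fun check => PySem.Dict.get? (PySem.Dict.mk check) "status" == some "checked_no_signal") then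
    "checked_no_signal"
  else if relevant_checks.any (fun check => PySem.Dict.get? (PySem.Dict.mk check) "status" == some "data_unavailable") || !relevant_sources.isEmpty then
    if !(relevant_checks.any (fun check => PySem.Dict.get? (PySem.Dict.mk check) "status" == some "not_checked")) then
      "data_unavailable"
    else
      "not_checked"
  else if relevant_checks.any (fun check => PySem.Dict.get? (PySem.Dict.mk check) "status" == some "not_checked") then
    "not_checked"
  else
    "unknown"

-- ===== PORT B =====
def aggregate_category_status_py_alt (relevant_checks : List (List (String × String))) (relevant_sources : List String) : String :=
  let statuses : PySem.Set (Option String) :=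
    PySem.Set.ofList (relevant_checks.map (fun c => PySem.Dict.get? (PySem.Dict.mk c) "status"))
  if PySem.Set.contains statuses (some "checked_signal_found") then
    "checked_signal_found"
  else if PySem.Set.contains statuses (some "checked_no_signal") then
    "checked_no_signal"
  else if PySem.Set.contains statuses (some "not_checked") then
    "not_checked"
  else if PySem.Set.contains statuses (some "data_unavailable") || !relevant_sources.isEmpty then
    "data_unavailable"
  else
    "unknown"

-- ===== PRECONDITION & SPEC =====
def Spec_aggregate_category_status_py (relevant_checks : List (List (String × String))) (relevant_sources : List String) (out : String) : Prop := out = aggregate_category_status_py_alt relevant_checks relevant_sources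
instance (relevant_checks : List (List (String × String))) (relevant_sources : List String) (out : String) : Decidable (Spec_aggregate_category_status_py relevant_checks relevant_sources out) := by unfold Spec_aggregate_category_status_py; infer_instance

-- ===== CLAIM (what is proved, stated in full; the proofs are below) =====
def Claim_equal_aggregate_category_status_py : Prop := ∀ (relevant_checks : List (List (String × String))) (relevant_sources : List String), Dom_aggregate_category_status_py relevant_checks relevant_sources → Spec_aggregate_category_status_py relevant_checks relevant_sources (aggregate_category_status_py relevant_checks relevant_sources)

-- ===== LEMMAS AND PROOFS =====

-- membership in the one-pass status set = A's per-status scan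
theorem contains_statuses (rc : List (List (String × String))) (v : Option String) :
    PySem.Set.contains (PySem.Set.ofList (rc.map (fun c => PySem.Dict.get? (PySem.Dict.mk c) "status"))) v
      = rc.any (fun c => PySem.Dict.get? (PySem.Dict.mk c) "status" == v) := by
  rcases h : rc.any (fun c => PySem.Dict.get? (PySem.Dict.mk c) "status" == v) with _ | _
  · simp only [List.any_eq_false, beq_iff_eq] at h
    rw [Bool.eq_false_iff]
    intro hc
    rw [PySem.Set.contains_iff, PySem.Set.mem_ofList, List.mem_map] at hc
    obtain ⟨c, hm, he⟩ := hc
    exact h c hm (by simp [he])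
  · simp only [List.any_eq_true, beq_iff_eq] at h
    obtain ⟨c, hm, he⟩ := h
    rw [PySem.Set.contains_iff, PySem.Set.mem_ofList, List.mem_map]
    exact ⟨c, hm, he⟩

-- ===== VERDICT (by name: the statement is the Claim_ definition above) =====
theorem aggregate_category_status_py_spec : Claim_equal_aggregate_category_status_py := by
  intro rc rs _
  unfold Spec_aggregate_category_status_py aggregate_category_status_py aggregate_category_status_py_alt
  simp only [contains_statuses]
  split_ifs <;> simp_all
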